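-- pv_equiv track=rewrite | github.com/Ndriqim-H/treedepth-iterated-local-search | Utilities.py | count_duplicates_test
-- ===== SOURCE A (Python) =====
-- def count_duplicates_test(representation: list):
--     duplicate_list = list()
--     for c in range(len(representation)):
--         child_list = representation[c]
--         for node in child_list:
--             if node in duplicate_list:
--                 return True
--             else:
--                 duplicate_list.append(node)
--     return False
-- ===== SOURCE B (Python) =====
-- def count_duplicates_test(representation: list):
--     flat = [node for child_list in representation for node in child_list]
--     return len(flat) != len(set(flat))
-- ===== Notes on version B (the rewrite author's own statement) =====
-- stated objective: simpler
-- what changed: Replaces the interleaved membership-check-and-append loop with early return by a two-phase computation: flatten all nodes, then compare the total count with the number of distinct nodes.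
import Mathlib
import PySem

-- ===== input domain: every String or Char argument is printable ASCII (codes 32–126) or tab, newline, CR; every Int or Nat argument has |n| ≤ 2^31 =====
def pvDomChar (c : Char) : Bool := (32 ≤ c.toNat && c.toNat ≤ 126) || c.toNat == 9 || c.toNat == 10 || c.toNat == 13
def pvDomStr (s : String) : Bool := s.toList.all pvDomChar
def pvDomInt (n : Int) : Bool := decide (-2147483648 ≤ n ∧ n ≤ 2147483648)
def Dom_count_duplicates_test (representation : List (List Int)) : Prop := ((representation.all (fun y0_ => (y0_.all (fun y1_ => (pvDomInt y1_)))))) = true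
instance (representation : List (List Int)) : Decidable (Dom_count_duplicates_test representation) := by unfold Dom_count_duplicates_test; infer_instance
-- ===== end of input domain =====

-- B flattens all nodes first and compares total count with distinct count, instead of A's
-- interleaved membership-check-and-append loop with early return (objective: simpler).


-- ===== PORT A =====
-- inner 'for node in child_list' loop: returns (early-return flag, duplicate_list)
def cdtInner : List Int → List Int → (Bool × List Int)
  | [], dup => (false, dup)
  | n :: ns, dup => if n ∈ dup then (true, dup) else cdtInner ns (dup ++ [n])

-- outer 'for c in range(len(representation))' loop
def cdtOuter : List (List Int) → List Int → Bool
  | [], _ => false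
  | c :: cs, dup =>
      match cdtInner c dup with
      | (true, _) => true
      | (false, dup') => cdtOuter cs dup'

def count_duplicates_test (representation : List (List Int)) : Bool :=
  cdtOuter representation []

-- ===== PORT B =====
def count_duplicates_test_alt (representation : List (List Int)) : Bool :=
  let flat := representation.flatMap (fun child_list => child_list)
  decide (flat.length ≠ (PySem.Set.ofList flat).length)

-- ===== PRECONDITION & SPEC =====
def Spec_count_duplicates_test (representation : List (List Int)) (out : Bool) : Prop := out = count_duplicates_test_alt representation
instance (representation : List (List Int)) (out : Bool) : Decidable (Spec_count_duplicates_test representation out) := by unfold Spec_count_duplicates_test; infer_instance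

-- ===== CLAIM (what is proved, stated in full; the proofs are below) =====
def Claim_equal_count_duplicates_test : Prop := ∀ (representation : List (List Int)), Dom_count_duplicates_test representation → Spec_count_duplicates_test representation (count_duplicates_test representation)

-- ===== LEMMAS AND PROOFS =====

theorem cdtInner_append (l₁ l₂ dup : List Int) :
    cdtInner (l₁ ++ l₂) dup =
      match cdtInner l₁ dup with
      | (true, d) => (true, d)
      | (false, d) => cdtInner l₂ d := by
  induction l₁ generalizing dup with
  | nil => simp [cdtInner]
  | cons n ns ih =>
      simp only [List.cons_append, cdtInner]
      split_ifs with h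
      · rfl
      · exact ih _

theorem cdtOuter_eq_inner (cs : List (List Int)) (dup : List Int) :
    cdtOuter cs dup = (cdtInner cs.flatten dup).1 := by
  induction cs generalizing dup with
  | nil => simp [cdtOuter, cdtInner]
  | cons c cs ih =>
      simp only [cdtOuter, List.flatten_cons, cdtInner_append]
      rcases h : cdtInner c dup with ⟨b, d⟩
      cases b <;> simp [ih]

theorem cdtInner_true_iff (l : List Int) (dup : List Int) (hd : dup.Nodup) :
    (cdtInner l dup).1 = true ↔ ¬ (dup ++ l).Nodup := by
  induction l generalizing dup with
  | nil => simp [cdtInner, hd]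
  | cons n ns ih =>
      simp only [cdtInner]
      split_ifs with h
      · simp only [true_iff]
        intro hnd
        exact ((List.nodup_append.mp hnd).2.2 n h n (by simp)) rfl
      · have hd' : (dup ++ [n]).Nodup :=
          hd.append (List.nodup_singleton n)
            (fun a ha hb => h (by simpa using (List.mem_singleton.mp hb) ▸ ha))
        rw [ih _ hd', ← List.append_cons]

theorem foldl_add_length (xs : List Int) (s : List Int) (hs : s.Nodup) :
    (xs.foldl PySem.Set.add s).length ≤ s.length + xs.length ∧
      ((xs.foldl PySem.Set.add s).length = s.length + xs.length ↔ (s ++ xs).Nodup) := by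
  induction xs generalizing s with
  | nil => simp [hs]
  | cons x xs ih =>
      simp only [List.foldl_cons, List.length_cons]
      by_cases h : x ∈ s
      · have hadd : PySem.Set.add s x = s := by
          simp [PySem.Set.add, PySem.Set.contains, h]
        rw [hadd]
        obtain ⟨hle, _⟩ := ih s hs
        refine ⟨by omega, ?_, ?_⟩
        · intro he; omega
        · intro hnd
          exact absurd rfl ((List.nodup_append.mp hnd).2.2 x h x (by simp))
      · have hadd : PySem.Set.add s x = s ++ [x] := by
          simp [PySem.Set.add, PySem.Set.contains, h]
        rw [hadd]
        have hs' : (s ++ [x]).Nodup :=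
          hs.append (List.nodup_singleton x)
            (fun a ha hb => h (by simpa using (List.mem_singleton.mp hb) ▸ ha))
        obtain ⟨hle, hiff⟩ := ih (s ++ [x]) hs'
        simp only [List.length_append, List.length_singleton] at hle hiff
        rw [← List.append_cons] at hiff
        exact ⟨by omega, by rw [← hiff]; omega⟩

theorem decide_len_ne (l : List Int) :
    decide (l.length ≠ (PySem.Set.ofList l).length) = !decide l.Nodup := by
  have hof : PySem.Set.ofList l = l.foldl PySem.Set.add [] := by
    simp [PySem.Set.ofList_eq_foldl]
  have h := foldl_add_length l [] List.nodup_nil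
  simp only [List.nil_append, List.length_nil, Nat.zero_add] at h
  rw [hof]
  by_cases hnd : l.Nodup
  · simp [h.2.mpr hnd, hnd]
  · have hne : (l.foldl PySem.Set.add []).length ≠ l.length := fun he => hnd (h.2.mp he)
    simp only [hnd, decide_false, Bool.not_false]
    exact decide_eq_true (fun he => hne he.symm)

theorem alt_eq_not_nodup (representation : List (List Int)) :
    count_duplicates_test_alt representation = !decide representation.flatten.Nodup := by
  have : count_duplicates_test_alt representation
      = decide ((representation.flatMap (fun c => c)).length
          ≠ (PySem.Set.ofList (representation.flatMap (fun c => c))).length) := rfl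
  rw [this, decide_len_ne]
  simp

-- ===== VERDICT (by name: the statement is the Claim_ definition above) =====
theorem count_duplicates_test_spec : Claim_equal_count_duplicates_test := by
  intro representation _
  unfold Spec_count_duplicates_test count_duplicates_test
  rw [cdtOuter_eq_inner, alt_eq_not_nodup]
  by_cases hnd : representation.flatten.Nodup
  · have h1 : (cdtInner representation.flatten []).1 = false := by
      rw [Bool.eq_false_iff, Ne, cdtInner_true_iff _ [] List.nodup_nil]
      simpa using hnd
    rw [h1]
    simp [hnd]
  · have h1 : (cdtInner representation.flatten []).1 = true := by
      rw [cdtInner_true_iff _ [] List.nodup_nil]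
      simpa using hnd
    rw [h1]
    simp [hnd]
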